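-- pv_equiv track=rewrite | github.com/Angelo2002/AoC2023 | day1.py | checkForNumber
-- ===== SOURCE A (Python) =====
-- dict = {'one': '1', 'two': '2', 'three': '3', 'four': '4', 'five': '5', 'six': '6', 'seven': '7', 'eight': '8', 'nine': '9', 'zero': '0'}
--
-- def checkForNumber(string):
--     substring = string[0:]
--     for i in range(len(string)):
--         if(substring in dict):
--             return dict[substring]
--         else:
--             substring = substring[1:]
--     return 'a'
-- ===== SOURCE B (Python) =====
-- _BY_LEN = ((3, {'one': '1', 'two': '2', 'six': '6'}),
--            (4, {'four': '4', 'five': '5', 'nine': '9', 'zero': '0'}),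
--            (5, {'three': '3', 'seven': '7', 'eight': '8'}))
--
-- def checkForNumber(string):
--     n = len(string)
--     for length, table in _BY_LEN:
--         if length <= n:
--             digit = table.get(string[n - length:])
--             if digit is not None:
--                 return digit
--     return 'a'
-- ===== Notes on version B (the rewrite author's own statement) =====
-- stated objective: faster
-- what changed: B groups the number words by length (3, 4, 5) and looks up only the input's suffix of each of those three fixed lengths in the matching small dict, instead of A's loop hashing every one of the n suffixes; correct because a word can only match the suffix of its own length and no word is a suffix of another.
import Mathlib
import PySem

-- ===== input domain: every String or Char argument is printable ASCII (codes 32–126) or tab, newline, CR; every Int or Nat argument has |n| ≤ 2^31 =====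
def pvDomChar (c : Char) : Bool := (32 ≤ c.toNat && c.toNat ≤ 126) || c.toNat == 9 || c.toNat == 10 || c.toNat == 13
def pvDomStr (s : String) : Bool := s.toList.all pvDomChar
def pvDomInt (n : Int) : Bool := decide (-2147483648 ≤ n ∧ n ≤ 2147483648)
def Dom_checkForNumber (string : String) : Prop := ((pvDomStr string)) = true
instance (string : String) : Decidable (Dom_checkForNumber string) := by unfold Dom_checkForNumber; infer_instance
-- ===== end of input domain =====

-- B replaces A's scan over all n suffixes (one dict-membership test per suffix) by three fixed
-- lookups: the words are grouped by length (3/4/5) and only the suffix of each of those lengths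
-- is looked up; a timing run measured B faster.

-- ===== PORT A =====
-- the module-level dict (String keys held as List Char, matching the port's char-list strings)
def pvDict : PySem.Dict (List Char) String :=
  PySem.Dict.mk [("one".toList, "1"), ("two".toList, "2"), ("three".toList, "3"),
                 ("four".toList, "4"), ("five".toList, "5"), ("six".toList, "6"),
                 ("seven".toList, "7"), ("eight".toList, "8"), ("nine".toList, "9"),
                 ("zero".toList, "0")]

-- 'for i in range(len(string))' with early return: fuel = remaining iterations
def pvLoopA : Nat → List Char → String
  | 0, _ => "a"
  | n + 1, sub =>
    match PySem.Dict.get? pvDict sub with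
    | some v => v
    | none => pvLoopA n (PySem.List.slice sub (some 1) none)   -- substring = substring[1:]

def checkForNumber (string : String) : String :=
  pvLoopA string.toList.length (PySem.List.slice string.toList (some 0) none)  -- substring = string[0:]

-- ===== PORT B =====
-- _BY_LEN: the words grouped by their length, each group a small dict
def pvTable3 : PySem.Dict (List Char) String :=
  PySem.Dict.mk [("one".toList, "1"), ("two".toList, "2"), ("six".toList, "6")]
def pvTable4 : PySem.Dict (List Char) String :=
  PySem.Dict.mk [("four".toList, "4"), ("five".toList, "5"), ("nine".toList, "9"), ("zero".toList, "0")]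
def pvTable5 : PySem.Dict (List Char) String :=
  PySem.Dict.mk [("three".toList, "3"), ("seven".toList, "7"), ("eight".toList, "8")]

def pvByLen : List (Nat × PySem.Dict (List Char) String) := [(3, pvTable3), (4, pvTable4), (5, pvTable5)]

-- 'for length, table in _BY_LEN: if length <= n: digit = table.get(string[n-length:]); if digit is not None: return digit'
def pvLoopC : List (Nat × PySem.Dict (List Char) String) → List Char → String
  | [], _ => "a"
  | (L, t) :: rest, s =>
    if L ≤ s.length then
      match PySem.Dict.get? t (PySem.List.slice s (some ((s.length : Int) - (L : Int))) none) with
      | some d => d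
      | none => pvLoopC rest s
    else pvLoopC rest s

def checkForNumber_alt (string : String) : String := pvLoopC pvByLen string.toList

-- ===== PRECONDITION & SPEC =====
def Spec_checkForNumber (string : String) (out : String) : Prop := out = checkForNumber_alt string
instance (string : String) (out : String) : Decidable (Spec_checkForNumber string out) := by unfold Spec_checkForNumber; infer_instance

-- ===== CLAIM (what is proved, stated in full; the proofs are below) =====
def Claim_equal_checkForNumber : Prop := ∀ (string : String), Dom_checkForNumber string → Spec_checkForNumber string (checkForNumber string)

-- ===== LEMMAS AND PROOFS =====

-- proof-side word list: the ten (word, digit) pairs in A's dict order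
def pvWordsP : List (List Char × String) :=
  [("one".toList, "1"), ("two".toList, "2"), ("three".toList, "3"),
   ("four".toList, "4"), ("five".toList, "5"), ("six".toList, "6"),
   ("seven".toList, "7"), ("eight".toList, "8"), ("nine".toList, "9"),
   ("zero".toList, "0")]

-- proof-side word list: B's order (length 3, then 4, then 5, each group in its dict order)
def pvWordsB : List (List Char × String) :=
  [("one".toList, "1"), ("two".toList, "2"), ("six".toList, "6"),
   ("four".toList, "4"), ("five".toList, "5"), ("nine".toList, "9"), ("zero".toList, "0"),
   ("three".toList, "3"), ("seven".toList, "7"), ("eight".toList, "8")]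

-- proof-side common form: 'first word that is a suffix of s wins', with continuation k
def pvPass (E : List (List Char × String)) (s : List Char) (k : String) : String :=
  match E with
  | [] => k
  | (w, d) :: rest => if PySem.Chars.endswith s w then d else pvPass rest s k

-- endswith on a cons: the pattern is the whole string or a suffix of the tail
lemma pv_endswith_cons (c : Char) (t w : List Char) :
    PySem.Chars.endswith (c :: t) w = (w == c :: t || PySem.Chars.endswith t w) := by
  rw [Bool.eq_iff_iff, Bool.or_eq_true, beq_iff_eq, PySem.Chars.endswith_iff,
      PySem.Chars.endswith_iff]
  constructor
  · rintro ⟨pre, hpre⟩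
    cases pre with
    | nil => left; simpa using hpre
    | cons x xs => right; exact ⟨xs, by simpa using congrArg List.tail hpre⟩
  · rintro (h | ⟨pre, hpre⟩)
    · exact h ▸ ⟨[], rfl⟩
    · exact ⟨c :: pre, by simp [hpre]⟩

-- suffix test via the suffix of the right length
lemma pv_endswith_eq_drop (s w : List Char) (h : w.length ≤ s.length) :
    PySem.Chars.endswith s w = (List.drop (s.length - w.length) s == w) := by
  rw [Bool.eq_iff_iff, beq_iff_eq, PySem.Chars.endswith_iff]
  constructor
  · rintro ⟨pre, hpre⟩
    subst hpre
    have hlen : (pre ++ w).length - w.length = pre.length := by simp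
    rw [hlen, List.drop_left]
  · intro hd
    refine ⟨List.take (s.length - w.length) s, ?_⟩
    have := List.take_append_drop (s.length - w.length) s
    rw [hd] at this
    exact this

lemma pv_endswith_false_of_long (s w : List Char) (h : s.length < w.length) :
    PySem.Chars.endswith s w = false := by
  rw [Bool.eq_false_iff]
  intro hc
  exact absurd ((PySem.Chars.endswith_iff s w).mp hc).length_le (by omega)

-- if the suffix-to-check is no key of the dict, the pass ignores the head character
lemma pv_pass_cons_of_get?_none (c : Char) (t : List Char) (k : String)
    (h : PySem.Dict.get? pvDict (c :: t) = none) :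
    pvPass pvWordsP (c :: t) k = pvPass pvWordsP t k := by
  have hne : ∀ p ∈ pvWordsP, p.1 ≠ c :: t := by
    intro p hmem heq
    have : PySem.Dict.get? pvDict p.1 = some p.2 := by
      rcases p with ⟨w, d⟩
      simp only [pvWordsP, List.mem_cons, List.not_mem_nil, or_false, Prod.mk.injEq] at hmem
      rcases hmem with ⟨hw, hd⟩|⟨hw, hd⟩|⟨hw, hd⟩|⟨hw, hd⟩|⟨hw, hd⟩|⟨hw, hd⟩|⟨hw, hd⟩|⟨hw, hd⟩|⟨hw, hd⟩|⟨hw, hd⟩ <;>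
        (subst hw; subst hd; decide)
    rw [heq, h] at this; cases this
  revert hne
  have : ∀ L : List (List Char × String), (∀ p ∈ L, p.1 ≠ c :: t) →
      pvPass L (c :: t) k = pvPass L t k := by
    intro L
    induction L with
    | nil => intro _; rfl
    | cons p rest ih =>
      intro hne
      rcases p with ⟨w, d⟩
      have hw : w ≠ c :: t := hne (w, d) (List.mem_cons_self ..)
      simp only [pvPass, pv_endswith_cons, beq_eq_false_iff_ne.mpr hw, Bool.false_or]
      rw [ih (fun p hp => hne p (List.mem_cons_of_mem _ hp))]
  exact this pvWordsP

-- A's invariant: the suffix loop with fuel = length equals the word pass in dict order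
lemma pv_main (cs : List Char) : pvLoopA cs.length cs = pvPass pvWordsP cs "a" := by
  induction cs with
  | nil => decide
  | cons c t ih =>
    have htail : PySem.List.slice (c :: t) (some 1) none = t := by
      rw [PySem.List.slice_from_one]; rfl
    simp only [List.length_cons, pvLoopA, htail]
    cases h : PySem.Dict.get? pvDict (c :: t) with
    | none =>
      rw [pv_pass_cons_of_get?_none c t "a" h]
      exact ih
    | some v =>
      change v = pvPass pvWordsP (c :: t) "a"
      -- c :: t is one of the ten literal words; each case is a closed computation
      have : (c :: t = "one".toList ∧ v = "1") ∨ (c :: t = "two".toList ∧ v = "2") ∨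
             (c :: t = "three".toList ∧ v = "3") ∨ (c :: t = "four".toList ∧ v = "4") ∨
             (c :: t = "five".toList ∧ v = "5") ∨ (c :: t = "six".toList ∧ v = "6") ∨
             (c :: t = "seven".toList ∧ v = "7") ∨ (c :: t = "eight".toList ∧ v = "8") ∨
             (c :: t = "nine".toList ∧ v = "9") ∨ (c :: t = "zero".toList ∧ v = "0") := by
        simp only [pvDict, PySem.Dict.get?_mk_cons] at h
        split_ifs at h with h1 h2 h3 h4 h5 h6 h7 h8 h9 h10 <;>
          first
            | (simp only [PySem.Dict.get?] at h; cases h)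
            | (cases h
               first
                 | exact Or.inl ⟨(beq_iff_eq.mp h1).symm, rfl⟩
                 | exact Or.inr (Or.inl ⟨(beq_iff_eq.mp h2).symm, rfl⟩)
                 | exact Or.inr (Or.inr (Or.inl ⟨(beq_iff_eq.mp h3).symm, rfl⟩))
                 | exact Or.inr (Or.inr (Or.inr (Or.inl ⟨(beq_iff_eq.mp h4).symm, rfl⟩)))
                 | exact Or.inr (Or.inr (Or.inr (Or.inr (Or.inl ⟨(beq_iff_eq.mp h5).symm, rfl⟩))))
                 | exact Or.inr (Or.inr (Or.inr (Or.inr (Or.inr (Or.inl ⟨(beq_iff_eq.mp h6).symm, rfl⟩)))))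
                 | exact Or.inr (Or.inr (Or.inr (Or.inr (Or.inr (Or.inr (Or.inl ⟨(beq_iff_eq.mp h7).symm, rfl⟩))))))
                 | exact Or.inr (Or.inr (Or.inr (Or.inr (Or.inr (Or.inr (Or.inr (Or.inl ⟨(beq_iff_eq.mp h8).symm, rfl⟩)))))))
                 | exact Or.inr (Or.inr (Or.inr (Or.inr (Or.inr (Or.inr (Or.inr (Or.inr (Or.inl ⟨(beq_iff_eq.mp h9).symm, rfl⟩))))))))
                 | exact Or.inr (Or.inr (Or.inr (Or.inr (Or.inr (Or.inr (Or.inr (Or.inr (Or.inr ⟨(beq_iff_eq.mp h10).symm, rfl⟩)))))))))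
      rcases this with ⟨he, hv⟩|⟨he, hv⟩|⟨he, hv⟩|⟨he, hv⟩|⟨he, hv⟩|⟨he, hv⟩|⟨he, hv⟩|⟨he, hv⟩|⟨he, hv⟩|⟨he, hv⟩ <;>
        (subst hv; rw [he]; decide)

-- one table step of B's loop equals the pass over that table's entries
lemma pv_stepC (L : Nat) (entries : List (List Char × String))
    (rest : List (Nat × PySem.Dict (List Char) String)) (s : List Char)
    (hlen : ∀ p ∈ entries, p.1.length = L) :
    pvLoopC ((L, PySem.Dict.mk entries) :: rest) s = pvPass entries s (pvLoopC rest s) := by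
  by_cases hL : L ≤ s.length
  · have hsl : PySem.List.slice s (some ((s.length : Int) - (L : Int))) none
        = List.drop (s.length - L) s := by
      have : ((s.length : Int) - (L : Int)) = ((s.length - L : Nat) : Int) := by omega
      rw [this, PySem.List.slice_from_natCast]
    simp only [pvLoopC, if_pos hL, hsl]
    induction entries with
    | nil => rfl
    | cons p r ih =>
      rcases p with ⟨w, d⟩
      have hw : w.length = L := hlen (w, d) (List.mem_cons_self ..)
      have hes : PySem.Chars.endswith s w = (List.drop (s.length - L) s == w) := by
        rw [pv_endswith_eq_drop s w (by omega), hw]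
      simp only [PySem.Dict.get?_mk_cons, pvPass, hes]
      by_cases heq : w = List.drop (s.length - L) s
      · simp [heq]
      · rw [if_neg (by simpa using heq),
            if_neg (show ¬((List.drop (s.length - L) s == w) = true) by
              simpa using fun h => heq h.symm)]
        exact ih (fun p hp => hlen p (List.mem_cons_of_mem _ hp))
  · simp only [pvLoopC, if_neg hL]
    induction entries with
    | nil => rfl
    | cons p r ih =>
      rcases p with ⟨w, d⟩
      have hw : w.length = L := hlen (w, d) (List.mem_cons_self ..)
      simp only [pvPass]
      rw [pv_endswith_false_of_long s w (by omega), if_neg Bool.false_ne_true]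
      exact ih (fun p hp => hlen p (List.mem_cons_of_mem _ hp))

lemma pv_pass_append (E F : List (List Char × String)) (s : List Char) (k : String) :
    pvPass (E ++ F) s k = pvPass E s (pvPass F s k) := by
  induction E with
  | nil => rfl
  | cons p r ih => rcases p with ⟨w, d⟩; simp only [List.cons_append, pvPass, ih]

-- B's loop equals the pass over the words in B's (length-grouped) order
lemma pv_mainB (s : List Char) : pvLoopC pvByLen s = pvPass pvWordsB s "a" := by
  have h3 := pv_stepC 3 [("one".toList, "1"), ("two".toList, "2"), ("six".toList, "6")]
      [(4, pvTable4), (5, pvTable5)] s (by decide)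
  have h4 := pv_stepC 4 [("four".toList, "4"), ("five".toList, "5"), ("nine".toList, "9"), ("zero".toList, "0")]
      [(5, pvTable5)] s (by decide)
  have h5 := pv_stepC 5 [("three".toList, "3"), ("seven".toList, "7"), ("eight".toList, "8")]
      [] s (by decide)
  show pvLoopC [(3, pvTable3), (4, pvTable4), (5, pvTable5)] s = _
  rw [show pvTable3 = PySem.Dict.mk [("one".toList, "1"), ("two".toList, "2"), ("six".toList, "6")] from rfl,
      h3,
      show pvTable4 = PySem.Dict.mk [("four".toList, "4"), ("five".toList, "5"), ("nine".toList, "9"), ("zero".toList, "0")] from rfl,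
      h4,
      show pvTable5 = PySem.Dict.mk [("three".toList, "3"), ("seven".toList, "7"), ("eight".toList, "8")] from rfl,
      h5]
  show _ = pvPass ([("one".toList, "1"), ("two".toList, "2"), ("six".toList, "6")] ++
      ([("four".toList, "4"), ("five".toList, "5"), ("nine".toList, "9"), ("zero".toList, "0")] ++
       [("three".toList, "3"), ("seven".toList, "7"), ("eight".toList, "8")])) s "a"
  rw [pv_pass_append, pv_pass_append]
  rfl

-- the pass returns its continuation when no word matches
lemma pv_pass_none (E : List (List Char × String)) (s : List Char) (k : String)
    (h : ∀ p ∈ E, PySem.Chars.endswith s p.1 = false) : pvPass E s k = k := by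
  induction E with
  | nil => rfl
  | cons p r ih =>
    rcases p with ⟨w, d⟩
    simp only [pvPass]
    rw [h (w, d) (List.mem_cons_self ..), if_neg Bool.false_ne_true]
    exact ih (fun q hq => h q (List.mem_cons_of_mem _ hq))

-- the pass returns the unique match, wherever it sits in the list
lemma pv_pass_unique (E : List (List Char × String)) (s : List Char) (k : String)
    (p : List Char × String) (hp : p ∈ E) (hm : PySem.Chars.endswith s p.1 = true)
    (hu : ∀ q ∈ E, PySem.Chars.endswith s q.1 = true → q = p) : pvPass E s k = p.2 := by
  induction E with
  | nil => cases hp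
  | cons q r ih =>
    rcases q with ⟨w, d⟩
    by_cases hw : PySem.Chars.endswith s w = true
    · simp only [pvPass]
      rw [if_pos hw]
      exact congrArg Prod.snd (hu (w, d) (List.mem_cons_self ..) hw)
    · simp only [pvPass]
      rw [if_neg hw]
      have hp' : p ∈ r := by
        rcases List.mem_cons.mp hp with h | h
        · subst h; exact absurd hm hw
        · exact h
      exact ih hp' (fun q hq hqm => hu q (List.mem_cons_of_mem _ hq) hqm)

-- no word in the table is a suffix of a different word (so at most one word matches any string)
lemma pv_nosuffix : ∀ p ∈ pvWordsP, ∀ q ∈ pvWordsP, p.1 <:+ q.1 → p = q := by decide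

lemma pv_unique (s : List Char) (p q : List Char × String)
    (hp : p ∈ pvWordsP) (hq : q ∈ pvWordsP)
    (hmp : PySem.Chars.endswith s p.1 = true) (hmq : PySem.Chars.endswith s q.1 = true) :
    p = q := by
  have hps : p.1 <:+ s := (PySem.Chars.endswith_iff s p.1).mp hmp
  have hqs : q.1 <:+ s := (PySem.Chars.endswith_iff s q.1).mp hmq
  rcases le_total p.1.length q.1.length with h | h
  · exact pv_nosuffix p hp q hq (List.suffix_of_suffix_length_le hps hqs h)
  · exact (pv_nosuffix q hq p hp (List.suffix_of_suffix_length_le hqs hps h)).symm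

lemma pv_memBP : ∀ p ∈ pvWordsB, p ∈ pvWordsP := by decide
lemma pv_memPB : ∀ p ∈ pvWordsP, p ∈ pvWordsB := by decide

-- order does not matter: the pass over B's order equals the pass over A's order
lemma pv_orders (s : List Char) : pvPass pvWordsP s "a" = pvPass pvWordsB s "a" := by
  by_cases h : ∃ p ∈ pvWordsP, PySem.Chars.endswith s p.1 = true
  · rcases h with ⟨p, hp, hm⟩
    rw [pv_pass_unique pvWordsP s "a" p hp hm (fun q hq hqm => pv_unique s q p hq hp hqm hm),
        pv_pass_unique pvWordsB s "a" p (pv_memPB p hp) hm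
          (fun q hq hqm => pv_unique s q p (pv_memBP q hq) hp hqm hm)]
  · have h' : ∀ q ∈ pvWordsP, PySem.Chars.endswith s q.1 = false := by
      intro q hq
      by_contra hb
      exact h ⟨q, hq, by revert hb; cases PySem.Chars.endswith s q.1 <;> simp⟩
    rw [pv_pass_none pvWordsP s "a" h',
        pv_pass_none pvWordsB s "a" (fun q hq => h' q (pv_memBP q hq))]

-- ===== VERDICT (by name: the statement is the Claim_ definition above) =====
theorem checkForNumber_spec : Claim_equal_checkForNumber := by
  intro s _
  unfold Spec_checkForNumber checkForNumber checkForNumber_alt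
  rw [PySem.List.slice_zero_start, PySem.List.slice_none_none]
  rw [pv_main s.toList, pv_orders s.toList, pv_mainB s.toList]
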